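-- pv_equiv track=rewrite | github.com/YggdrasiI/Pyconsole | python/keykit_console.py | keykit_library_abc
-- ===== SOURCE A (Python) =====
-- def keykit_library_abc(elems):
--     """Split elements into separate chunks for first character."""
--
--     # Combine 'x' and 'X' fields
--     elems.sort(key=lambda el: el.lower())
--
--     char = elems[0][0].lower()
--     n = 0
--     s = char.upper()+"\n"
--     for el in elems:
--         if el[0].lower() == char:
--             n += 1
--             if n > 4:
--                 s += "\n"
--                 n = 0
--
--             s += "%15s%s " % (el, "" if el[-1] == "*" else " ")
--         else:
--             char = el[0].lower()
--             n = 0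
--             s += "\n%s\n" % (char.upper(),)
--             s += "%15s " % (el,)
--     return s
-- ===== SOURCE B (Python) =====
-- def keykit_library_abc(elems):
--     """Split elements into separate chunks for first character."""
--     # sort in place (same observable mutation as the original)
--     elems.sort(key=lambda el: el.lower())
--     # phase 1: chunk the sorted list into runs of equal first letter (case-folded)
--     runs = []
--     i = 0
--     while i < len(elems):
--         k = elems[i][0].lower()
--         j = i + 1
--         while j < len(elems) and elems[j][0].lower() == k:
--             j += 1
--         runs.append((k, elems[i:j]))
--         i = j
--     # phase 2: render each run; the first run's members are all counted,
--     # later runs print their first member plain ('%15s ') and uncounted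
--     parts = []
--     for g, (k, members) in enumerate(runs):
--         if g == 0:
--             parts.append(k.upper() + "\n")
--             rest = members
--         else:
--             parts.append("\n%s\n" % k.upper())
--             parts.append("%15s " % members[0])
--             rest = members[1:]
--         n = 0
--         for el in rest:
--             n += 1
--             if n > 4:
--                 parts.append("\n")
--                 n = 0
--             parts.append("%15s%s " % (el, "" if el[-1] == "*" else " "))
--     return "".join(parts)
-- ===== Notes on version B (the rewrite author's own statement) =====
-- stated objective: alternative
-- what changed: B replaces A's single stateful loop (running char/counter/string state) by a two-phase decomposition: first chunk the sorted list into runs of equal first letter with a two-pointer scan, then render each run independently (header, plain uncounted first member for non-first runs, counted members with the every-5th-newline rule), joining the parts at the end.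
-- outside the precondition, e.g. on keykit_library_abc([]): A raises IndexError, B returns ''
import Mathlib
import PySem

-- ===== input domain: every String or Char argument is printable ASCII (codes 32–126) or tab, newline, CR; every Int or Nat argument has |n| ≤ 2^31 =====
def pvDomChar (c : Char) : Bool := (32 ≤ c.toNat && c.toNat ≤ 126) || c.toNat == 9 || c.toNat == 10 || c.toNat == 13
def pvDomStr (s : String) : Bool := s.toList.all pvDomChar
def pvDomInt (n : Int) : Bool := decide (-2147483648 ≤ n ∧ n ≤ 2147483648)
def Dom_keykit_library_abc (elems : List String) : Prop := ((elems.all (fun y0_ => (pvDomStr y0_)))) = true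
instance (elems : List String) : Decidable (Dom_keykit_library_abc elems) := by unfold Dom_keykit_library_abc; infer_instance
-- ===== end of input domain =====

-- B groups the sorted list into runs of equal first letter and renders each run,
-- instead of A's single stateful loop; same cost (objective: alternative decomposition).
-- Both Pythons sort `elems` in place; the theorems below are about the RETURN value
-- (the mutation is identical in A and B). Proofs are over List Char (String.ofList at the end).

-- ===== PORT A =====
-- el[0].lower(): Python compares the 1-char strings; ported as the lower-cased Char
-- ((PySem.List.pyGet? …).getD ' ' — the default is unreachable under Pre_, where every element is nonempty).
def pvKey (el : String) : Char :=
  PySem.Chars.lowerChar ((PySem.List.pyGet? el.toList 0).getD ' ')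

-- "%15s" % el : right-justify with spaces to width 15
def pvPad15 (el : String) : List Char :=
  List.replicate (15 - el.toList.length) ' ' ++ el.toList

-- "%15s%s " % (el, "" if el[-1] == "*" else " ")  (el[-1]'s default unreachable under Pre_)
def pvFmtItem (el : String) : List Char :=
  pvPad15 el ++ (if ((PySem.List.pyGet? el.toList (-1)).getD ' ') == '*' then [] else [' ']) ++ [' ']

-- the `for el in elems` loop of A: state (char, n, s)
def pvLoopA (char : Char) (n : Nat) (s : List Char) (l : List String) : List Char :=
  match l with
  | [] => s
  | el :: rest =>
    if pvKey el == char then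
      if n + 1 > 4 then
        pvLoopA char 0 (s ++ ['\n'] ++ pvFmtItem el) rest
      else
        pvLoopA char (n + 1) (s ++ pvFmtItem el) rest
    else
      let c := pvKey el
      pvLoopA c 0 (s ++ ['\n', PySem.Chars.upperChar c, '\n'] ++ pvPad15 el ++ [' ']) rest

def keykit_library_abc (elems : List String) : String :=
  let sortedE := PySem.List.sorted elems (fun el => PySem.Str.lower el) false
  -- char = elems[0][0].lower(); the getD "" default is unreachable under Pre_ (elems ≠ [])
  let char := pvKey ((PySem.List.pyGet? sortedE 0).getD "")
  String.ofList (pvLoopA char 0 [PySem.Chars.upperChar char, '\n'] sortedE)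

-- ===== PORT B =====
-- phase 1 of Source B: the two-pointer while loop chunking the sorted list into runs
-- (the inner `while j < len and elems[j][0].lower() == k` scan is the takeWhile/dropWhile split)
def pvRuns (l : List String) : List (Char × List String) :=
  match l with
  | [] => []
  | x :: xs =>
    let k := pvKey x
    (k, x :: xs.takeWhile (fun e => pvKey e == k)) :: pvRuns (xs.dropWhile (fun e => pvKey e == k))
termination_by l.length
decreasing_by
  simpa [Nat.lt_succ_iff] using List.length_dropWhile_le (fun e => pvKey e == pvKey x) xs

-- the inner `for el in rest` loop of Source B with its counter n
def pvRenderMembers (n : Nat) (ms : List String) : List Char :=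
  match ms with
  | [] => []
  | el :: rest =>
    if n + 1 > 4 then
      '\n' :: (pvFmtItem el ++ pvRenderMembers 0 rest)
    else
      pvFmtItem el ++ pvRenderMembers (n + 1) rest

-- the `for g, (k, members) in enumerate(runs)` loop of Source B
def pvRenderGroups (g : Nat) (gs : List (Char × List String)) : List Char :=
  match gs with
  | [] => []
  | (k, ms) :: rest =>
    (if g == 0 then
      [PySem.Chars.upperChar k, '\n'] ++ pvRenderMembers 0 ms
     else
      ['\n', PySem.Chars.upperChar k, '\n'] ++
        (match ms with
         | [] => []   -- unreachable: runs are nonempty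
         | m0 :: mrest => pvPad15 m0 ++ [' '] ++ pvRenderMembers 0 mrest))
    ++ pvRenderGroups (g + 1) rest

def keykit_library_abc_alt (elems : List String) : String :=
  let sortedE := PySem.List.sorted elems (fun el => PySem.Str.lower el) false
  String.ofList (pvRenderGroups 0 (pvRuns sortedE))

-- ===== PRECONDITION & SPEC =====
-- A raises IndexError on [] (elems[0]) and on any empty-string element (el[0], el[-1]); exactly those are excluded.
def Pre_keykit_library_abc (elems : List String) : Prop :=
  elems ≠ [] ∧ ∀ el ∈ elems, el ≠ ""
instance (elems : List String) : Decidable (Pre_keykit_library_abc elems) := by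
  unfold Pre_keykit_library_abc; infer_instance

def pvWitness_keykit_library_abc : List String := ["beta*", "Alpha", "apple", "b", "ax"]

def Spec_keykit_library_abc (elems : List String) (out : String) : Prop := out = keykit_library_abc_alt elems
instance (elems : List String) (out : String) : Decidable (Spec_keykit_library_abc elems out) := by unfold Spec_keykit_library_abc; infer_instance

-- ===== CLAIM (what is proved, stated in full; the proofs are below) =====
def Claim_equal_keykit_library_abc : Prop := ∀ (elems : List String), Dom_keykit_library_abc elems → Pre_keykit_library_abc elems → Spec_keykit_library_abc elems (keykit_library_abc elems)

-- ===== LEMMAS AND PROOFS =====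

-- counter value after a run of counted members
def pvNAfter (n : Nat) (ms : List String) : Nat :=
  ms.foldl (fun n _ => if n + 1 > 4 then 0 else n + 1) n

theorem pv_dropWhile_cons_not {a : Type} (p : a -> Bool) (l : List a) (y : a) (ys : List a)
    (h : l.dropWhile p = y :: ys) : p y = false := by
  induction l with
  | nil => simp at h
  | cons hd tl ih =>
    rw [List.dropWhile_cons] at h
    by_cases hp : p hd
    · simp only [hp, if_true] at h
      exact ih h
    · simp only [hp, if_false, Bool.false_eq_true] at h
      cases h
      simpa using hp

theorem pvLoopA_run (grp : List String) :
    ∀ (c : Char) (n : Nat) (s : List Char) (rest : List String),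
      (∀ e ∈ grp, pvKey e = c) →
      pvLoopA c n s (grp ++ rest) =
        pvLoopA c (pvNAfter n grp) (s ++ pvRenderMembers n grp) rest := by
  induction grp with
  | nil => intro c n s rest _; simp [pvNAfter, pvRenderMembers]
  | cons e grp' ih =>
    intro c n s rest hall
    have he : pvKey e = c := hall e (by simp)
    simp only [List.cons_append, pvLoopA, he, beq_self_eq_true, if_true]
    by_cases h4 : n + 1 > 4
    · rw [if_pos h4, ih c 0 _ rest (fun x hx => hall x (by simp [hx]))]
      simp [pvNAfter, pvRenderMembers, show (4:Nat) ≤ n from by omega, List.append_assoc]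
    · rw [if_neg h4, ih c (n + 1) _ rest (fun x hx => hall x (by simp [hx]))]
      simp [pvNAfter, pvRenderMembers, show ¬ (4:Nat) ≤ n from by omega, List.append_assoc]

theorem pvRenderGroups_pos (gs : List (Char × List String)) :
    ∀ (i j : Nat), pvRenderGroups (i + 1) gs = pvRenderGroups (j + 1) gs := by
  induction gs with
  | nil => intro i j; simp [pvRenderGroups]
  | cons g rest ih =>
    intro i j
    obtain ⟨k, ms⟩ := g
    simp only [pvRenderGroups]
    rw [ih (i + 1) (j + 1)]
    simp

theorem pvMain (m : Nat) :
    ∀ (l : List String), l.length ≤ m →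
      ∀ (c : Char) (n : Nat) (s : List Char),
        (∀ x ∈ l.head?, pvKey x ≠ c) →
        pvLoopA c n s l = s ++ pvRenderGroups 1 (pvRuns l) := by
  induction m with
  | zero =>
    intro l hl c n s _
    have : l = [] := List.length_eq_zero_iff.mp (Nat.le_zero.mp hl)
    subst this
    simp [pvLoopA, pvRuns, pvRenderGroups]
  | succ m ih =>
    intro l hl c n s hhead
    match l with
    | [] => simp [pvLoopA, pvRuns, pvRenderGroups]
    | x :: xs =>
      have hx : pvKey x ≠ c := hhead x (by simp)
      have hsplit : xs.takeWhile (fun e => pvKey e == pvKey x) ++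
          xs.dropWhile (fun e => pvKey e == pvKey x) = xs :=
        List.takeWhile_append_dropWhile
      have htake : ∀ e ∈ xs.takeWhile (fun e => pvKey e == pvKey x), pvKey e = pvKey x :=
        fun e he => by simpa using List.mem_takeWhile_imp he
      have hdroplen : (xs.dropWhile (fun e => pvKey e == pvKey x)).length ≤ m := by
        have h1 := List.length_dropWhile_le (fun e => pvKey e == pvKey x) xs
        simp only [List.length_cons] at hl
        omega
      have hdrophead : ∀ x' ∈ (xs.dropWhile (fun e => pvKey e == pvKey x)).head?,
          pvKey x' ≠ pvKey x := by
        intro x' hx'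
        match hdw : xs.dropWhile (fun e => pvKey e == pvKey x) with
        | [] => rw [hdw] at hx'; simp at hx'
        | y :: ys =>
          rw [hdw] at hx'
          simp only [List.head?_cons, Option.mem_some_iff] at hx'
          subst hx'
          simpa using pv_dropWhile_cons_not _ xs y ys hdw
      rw [pvRuns]
      simp only [pvLoopA]
      rw [if_neg (by simp [hx])]
      conv_lhs => rw [← hsplit]
      rw [pvLoopA_run _ (pvKey x) 0 _ _ htake,
          ih _ hdroplen (pvKey x) _ _ hdrophead]
      simp only [pvRenderGroups]
      rw [pvRenderGroups_pos _ 1 0]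
      simp [List.append_assoc]

-- the first member of the first group is counted (n: 0 → 1)
theorem pvRenderMembers_zero_cons (x : String) (ms : List String) :
    pvRenderMembers 0 (x :: ms) = pvFmtItem x ++ pvRenderMembers 1 ms := by
  simp [pvRenderMembers]

-- ===== VERDICT (by name: the statement is the Claim_ definition above) =====
theorem keykit_library_abc_spec : Claim_equal_keykit_library_abc := by
  intro elems _ hpre
  obtain ⟨hne, -⟩ := hpre
  unfold Spec_keykit_library_abc keykit_library_abc keykit_library_abc_alt
  have hsne : PySem.List.sorted elems (fun el => PySem.Str.lower el) false ≠ [] := by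
    simpa [PySem.List.sorted_eq_nil_iff] using hne
  match hmatch : PySem.List.sorted elems (fun el => PySem.Str.lower el) false with
  | [] => exact absurd hmatch hsne
  | x :: xs =>
    simp only [PySem.List.pyGet?_zero_cons, Option.getD_some]
    have hsplit : xs.takeWhile (fun e => pvKey e == pvKey x) ++
        xs.dropWhile (fun e => pvKey e == pvKey x) = xs :=
      List.takeWhile_append_dropWhile
    have htake : ∀ e ∈ xs.takeWhile (fun e => pvKey e == pvKey x), pvKey e = pvKey x :=
      fun e he => by simpa using List.mem_takeWhile_imp he
    have hdrophead : ∀ x' ∈ (xs.dropWhile (fun e => pvKey e == pvKey x)).head?,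
        pvKey x' ≠ pvKey x := by
      intro x' hx'
      match hdw : xs.dropWhile (fun e => pvKey e == pvKey x) with
      | [] => rw [hdw] at hx'; simp at hx'
      | y :: ys =>
        rw [hdw] at hx'
        simp only [List.head?_cons, Option.mem_some_iff] at hx'
        subst hx'
        simpa using pv_dropWhile_cons_not _ xs y ys hdw
    rw [pvRuns]
    simp only [pvLoopA, beq_self_eq_true, if_true]
    rw [if_neg (by omega : ¬ (0 + 1 > 4))]
    conv_lhs => rw [← hsplit]
    rw [pvLoopA_run _ (pvKey x) 1 _ _ htake,
        pvMain (xs.dropWhile (fun e => pvKey e == pvKey x)).length _ le_rfl (pvKey x) _ _ hdrophead]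
    simp only [pvRenderGroups, pvRenderMembers_zero_cons]
    simp [List.append_assoc]
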